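-- pv_equiv track=rewrite | github.com/brightcosmo/restaurant-simulator | restaurant_simulator.py | validate_user_choice
-- ===== SOURCE A (Python) =====
-- def validate_user_choice(options,user_input):
--     # Checks if user input is a digit, and if the digit is valid for the menu
--     # Then, checks through the whole list to see if there exists a meal matching the number inputted by the user
--     if user_input.isdigit():
--         number_meal = int(user_input)
--         for i in range(len(options)):
--             if i + 1 == number_meal:
--                 return True
--         return False
--     else:
--         return False
-- ===== SOURCE B (Python) =====
-- def validate_user_choice(options, user_input):
--     # Same digit-check and int conversion as A, but the index-scan loop is
--     # replaced by a single closed-form bound comparison.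
--     if user_input.isdigit():
--         number_meal = int(user_input)
--         return 1 <= number_meal <= len(options)
--     else:
--         return False
-- ===== Notes on version B (the rewrite author's own statement) =====
-- stated objective: simpler
-- what changed: The linear scan over range(len(options)) looking for an index i with i+1 == number_meal is replaced by the closed-form bound check 1 <= number_meal <= len(options).
import Mathlib
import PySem

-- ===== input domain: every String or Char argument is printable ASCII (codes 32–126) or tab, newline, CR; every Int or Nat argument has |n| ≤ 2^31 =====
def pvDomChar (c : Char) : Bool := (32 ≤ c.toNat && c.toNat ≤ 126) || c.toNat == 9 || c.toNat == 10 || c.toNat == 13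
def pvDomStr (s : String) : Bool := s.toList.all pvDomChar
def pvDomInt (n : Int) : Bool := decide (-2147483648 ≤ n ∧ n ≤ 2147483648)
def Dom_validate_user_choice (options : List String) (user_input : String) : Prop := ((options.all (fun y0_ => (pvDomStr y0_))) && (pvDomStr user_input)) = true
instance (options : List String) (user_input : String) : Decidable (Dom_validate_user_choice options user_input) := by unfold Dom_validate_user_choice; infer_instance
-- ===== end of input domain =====

-- ===== PORT A =====
-- A's for-loop 'for i in range(len(options)): if i+1 == number_meal: return True; return False'
def pvLoopA (number_meal : Int) : List Int → Bool
  | [] => false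
  | i :: rest => if i + 1 = number_meal then true else pvLoopA number_meal rest

def validate_user_choice (options : List String) (user_input : String) : Bool :=
  if PySem.Str.strIsdigit user_input then
    -- int(user_input) cannot fail after isdigit on the ASCII domain; getD 0 is never the default
    let number_meal : Int := (PySem.Int.ofStr? user_input).getD 0
    pvLoopA number_meal (PySem.List.pyRange 0 (options.length : Int) 1)
  else false

-- ===== PORT B =====
-- B: same digit-check and conversion, closed-form bound check instead of the scan
def validate_user_choice_alt (options : List String) (user_input : String) : Bool :=
  if PySem.Str.strIsdigit user_input then
    let number_meal : Int := (PySem.Int.ofStr? user_input).getD 0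
    decide (1 ≤ number_meal ∧ number_meal ≤ (options.length : Int))
  else false

-- ===== PRECONDITION & SPEC =====
def Spec_validate_user_choice (options : List String) (user_input : String) (out : Bool) : Prop := out = validate_user_choice_alt options user_input
instance (options : List String) (user_input : String) (out : Bool) : Decidable (Spec_validate_user_choice options user_input out) := by unfold Spec_validate_user_choice; infer_instance

-- ===== CLAIM (what is proved, stated in full; the proofs are below) =====
def Claim_equal_validate_user_choice : Prop := ∀ (options : List String) (user_input : String), Dom_validate_user_choice options user_input → Spec_validate_user_choice options user_input (validate_user_choice options user_input)

-- ===== LEMMAS AND PROOFS =====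
theorem pvLoopA_range (n : Int) : ∀ (k : Nat) (a b : Int), (b - a).toNat = k →
    pvLoopA n (PySem.List.pyRange a b 1) = decide (a + 1 ≤ n ∧ n ≤ b) := by
  intro k
  induction k with
  | zero =>
    intro a b hk
    have hba : b ≤ a := by omega
    rw [PySem.List.pyRange_one_eq_nil hba]
    simp only [pvLoopA]
    symm
    rw [decide_eq_false_iff_not]
    omega
  | succ k ih =>
    intro a b hk
    have hab : a < b := by omega
    rw [PySem.List.pyRange_one_cons hab]
    simp only [pvLoopA]
    by_cases hn : a + 1 = n
    · rw [if_pos hn]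
      symm
      rw [decide_eq_true_eq]
      omega
    · rw [if_neg hn, ih (a + 1) b (by omega)]
      simp only [decide_eq_decide]
      omega

-- ===== VERDICT (by name: the statement is the Claim_ definition above) =====
theorem validate_user_choice_spec : Claim_equal_validate_user_choice := by
  intro options user_input _
  unfold Spec_validate_user_choice validate_user_choice validate_user_choice_alt
  by_cases h : PySem.Str.strIsdigit user_input
  · rw [if_pos h, if_pos h,
      pvLoopA_range _ ((options.length : Int) - 0).toNat 0 (options.length : Int) rfl]
    simp
  · rw [if_neg h, if_neg h]
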